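-- pv_equiv track=rewrite | github.com/AugustDanell/Kattis-Assignments | Python/fbiuniversal.py | decimal_sum
-- ===== SOURCE A (Python) =====
-- def get_numbers():
--     return list("0123456789ACDEFHJKLMNPRTVWX")
--
-- def decimal_sum(num_str):
--     sum_ = 0
--     letters = get_numbers()
--     power = 0
--     for letter in num_str[::-1]:
--         sum_ += letters.index(letter)*(27**power)
--         power +=1
--
--     return sum_
-- ===== SOURCE B (Python) =====
-- def decimal_sum(num_str):
--     letters = "0123456789ACDEFHJKLMNPRTVWX"
--     result = 0
--     for letter in num_str:
--         result = result * 27 + letters.index(letter)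
--     return result
-- ===== Notes on version B (the rewrite author's own statement) =====
-- stated objective: idiomatic
-- what changed: Horner's method: a single forward pass accumulating result = result*27 + digit, dropping the reversed iteration, the power counter and the 27**power exponentiation.
import Mathlib
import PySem

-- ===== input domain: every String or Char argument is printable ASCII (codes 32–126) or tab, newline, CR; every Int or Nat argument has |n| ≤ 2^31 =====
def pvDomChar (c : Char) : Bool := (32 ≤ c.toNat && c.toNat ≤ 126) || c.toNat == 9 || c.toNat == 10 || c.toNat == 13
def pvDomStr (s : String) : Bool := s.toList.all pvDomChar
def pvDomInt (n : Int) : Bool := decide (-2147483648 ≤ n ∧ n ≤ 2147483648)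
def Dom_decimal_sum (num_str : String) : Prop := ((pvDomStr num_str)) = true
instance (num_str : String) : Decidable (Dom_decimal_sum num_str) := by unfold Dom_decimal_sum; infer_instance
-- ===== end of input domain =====

-- B replaces A's reversed pass with explicit powers 27**power by a forward Horner pass
-- (result = result*27 + digit); same cost class, simpler loop state (objective: idiomatic).

-- ===== PORT A =====
-- get_numbers(): the digit alphabet as a list of characters
def pvLetters : List Char := "0123456789ACDEFHJKLMNPRTVWX".toList

-- letters.index(letter); on Pre_ the character is present, so the .getD 0 default is never used
-- (outside Pre_ Python raises ValueError).
def pvIdx (c : Char) : Int := ((PySem.List.index? pvLetters c).getD 0 : Nat)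

-- 'for letter in num_str[::-1]: sum_ += letters.index(letter)*(27**power); power += 1'
-- num_str[::-1] is the reversed string (exact); the loop is the foldl over it carrying (sum_, power).
def decimal_sum (num_str : String) : Int :=
  (num_str.toList.reverse.foldl
    (fun (st : Int × Nat) letter => (st.1 + pvIdx letter * (27 : Int) ^ st.2, st.2 + 1))
    (0, 0)).1

-- ===== PORT B =====
-- forward Horner pass: result = result*27 + letters.index(letter)
def decimal_sum_alt (num_str : String) : Int :=
  num_str.toList.foldl (fun result letter => result * 27 + pvIdx letter) 0

-- ===== PRECONDITION & SPEC =====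
-- Pre_: every character is a valid base-27 digit; on any other character the Python A
-- (and B alike) raises ValueError from .index.
def Pre_decimal_sum (num_str : String) : Prop :=
  num_str.toList.all (fun c => pvLetters.contains c) = true
instance (num_str : String) : Decidable (Pre_decimal_sum num_str) := by unfold Pre_decimal_sum; infer_instance

def pvWitness_decimal_sum : String := "A1X"

def Spec_decimal_sum (num_str : String) (out : Int) : Prop := out = decimal_sum_alt num_str
instance (num_str : String) (out : Int) : Decidable (Spec_decimal_sum num_str out) := by unfold Spec_decimal_sum; infer_instance

-- ===== CLAIM (what is proved, stated in full; the proofs are below) =====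
def Claim_equal_decimal_sum : Prop := ∀ (num_str : String), Dom_decimal_sum num_str → Pre_decimal_sum num_str → Spec_decimal_sum num_str (decimal_sum num_str)

-- ===== LEMMAS AND PROOFS =====

-- A's loop only increments the power component by the length of what it consumes.
theorem pvSnd (l : List Char) (s : Int) (p : Nat) :
    (l.foldl (fun (st : Int × Nat) c => (st.1 + pvIdx c * (27 : Int) ^ st.2, st.2 + 1)) (s, p)).2
      = p + l.length := by
  induction l generalizing s p with
  | nil => simp
  | cons c l ih => simp [List.foldl, ih]; omega

-- Horner with a nonzero accumulator splits off r * 27^len.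
theorem pvHorner (l : List Char) (r : Int) :
    l.foldl (fun result c => result * 27 + pvIdx c) r
      = r * (27 : Int) ^ l.length + l.foldl (fun result c => result * 27 + pvIdx c) 0 := by
  induction l generalizing r with
  | nil => simp
  | cons c l ih =>
    simp only [List.foldl]
    rw [ih, ih (0 * 27 + pvIdx c)]
    simp [pow_succ]
    ring

-- Core equality on lists: A's reversed power-sum equals B's forward Horner value.
theorem pvMain (l : List Char) :
    (l.reverse.foldl (fun (st : Int × Nat) c => (st.1 + pvIdx c * (27 : Int) ^ st.2, st.2 + 1)) (0, 0)).1
      = l.foldl (fun result c => result * 27 + pvIdx c) 0 := by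
  induction l with
  | nil => rfl
  | cons c l ih =>
    simp only [List.reverse_cons, List.foldl_append, List.foldl]
    rw [pvSnd, ih]
    simp only [Nat.zero_add, List.length_reverse]
    rw [pvHorner l (0 * 27 + pvIdx c)]
    ring

-- ===== VERDICT (by name: the statement is the Claim_ definition above) =====
theorem decimal_sum_spec : Claim_equal_decimal_sum := by
  intro s _ _
  unfold Spec_decimal_sum decimal_sum decimal_sum_alt
  exact pvMain s.toList
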